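-- pv_equiv track=rewrite | github.com/jasonwarta/division-2-clock | tools/build_durations.py | compute_minute_durations
-- ===== SOURCE A (Python) =====
-- from collections import defaultdict
--
-- def compute_minute_durations(rows, max_sane_duration_sec):
--     """Record the duration of each observed in-game minute.
--
--     A minute's duration is only counted when *both* the transition INTO it
--     and the transition OUT of it are present in the data (each as a clean
--     1-minute step from the previous row). This rejects:
--
--       - The first row of the recording (we don't know when that minute
--         started -- it was already on screen when capture began).
--       - Any row where the previous row jumped by more than 1 minute, e.g.
--         because the clock was hidden behind a closed menu, the player was
--         AFK-kicked and reconnected, or OCR briefly missed transitions.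
--
--     For those rows we know neither when the displayed minute started nor
--     how long it had already been visible, so attributing any duration to
--     that minute slot would be inaccurate. We wait for the next clean
--     transition out and start recording from there.
--     """
--     durations = defaultdict(list)
--     skipped_gaps = 0
--     skipped_outliers = 0
--     skipped_post_gap_starts = 0
--
--     def minute_diff(prev, curr):
--         d = (curr[1] * 60 + curr[2]) - (prev[1] * 60 + prev[2])
--         if d < 0:
--             d += 1440
--         return d
--
--     # Iterate over each row that has both a predecessor and a successor.
--     # Row[i] represents some minute slot; we record its duration only if:
--     #   1. transition (i-1 -> i) was a clean 1-minute step (so we observed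
--     #      the moment it started), AND
--     #   2. transition (i -> i+1) is a clean 1-minute step (so we observed
--     #      the moment it ended).
--     for i in range(1, len(rows) - 1):
--         prev, curr, nxt = rows[i - 1], rows[i], rows[i + 1]
--
--         if minute_diff(prev, curr) != 1:
--             skipped_post_gap_starts += 1
--             continue
--
--         if minute_diff(curr, nxt) != 1:
--             skipped_gaps += 1
--             continue
--
--         duration_ms = nxt[0] - curr[0]
--         if duration_ms <= 0 or duration_ms > max_sane_duration_sec * 1000:
--             skipped_outliers += 1
--             continue
--
--         durations[(curr[1], curr[2])].append(duration_ms)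
--
--     return durations, skipped_gaps, skipped_outliers, skipped_post_gap_starts
-- ===== SOURCE B (Python) =====
-- def compute_minute_durations(rows, max_sane_duration_sec):
--     """Staged version: one transition table, independent counting passes,
--     then a grouping pass over the surviving events."""
--     def minute_diff(prev, curr):
--         d = (curr[1] * 60 + curr[2]) - (prev[1] * 60 + prev[2])
--         return d + 1440 if d < 0 else d
--
--     diffs = [minute_diff(a, b) for a, b in zip(rows, rows[1:])]
--     pairs = list(zip(diffs, diffs[1:]))
--     skipped_post_gap_starts = sum(1 for into, _ in pairs if into != 1)
--     skipped_gaps = sum(1 for into, out in pairs if into == 1 and out != 1)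
--     limit = max_sane_duration_sec * 1000
--     events = [(curr, nxt[0] - curr[0])
--               for (into, out), curr, nxt in zip(pairs, rows[1:], rows[2:])
--               if into == 1 and out == 1]
--     skipped_outliers = sum(1 for _, d in events if d <= 0 or d > limit)
--     durations = {}
--     for curr, d in events:
--         if 0 < d <= limit:
--             durations.setdefault((curr[1], curr[2]), []).append(d)
--     return durations, skipped_gaps, skipped_outliers, skipped_post_gap_starts
-- ===== Notes on version B (the rewrite author's own statement) =====
-- stated objective: alternative
-- what changed: Replaces A's single indexed loop with branch-and-continue control flow by a staged pipeline: a precomputed transition-diff table, the two skip counters computed as independent counting passes over adjacent diff pairs, the surviving events materialised as a list, the outlier counter as a count over that list, and the durations dict built by one grouping pass.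
import Mathlib
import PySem

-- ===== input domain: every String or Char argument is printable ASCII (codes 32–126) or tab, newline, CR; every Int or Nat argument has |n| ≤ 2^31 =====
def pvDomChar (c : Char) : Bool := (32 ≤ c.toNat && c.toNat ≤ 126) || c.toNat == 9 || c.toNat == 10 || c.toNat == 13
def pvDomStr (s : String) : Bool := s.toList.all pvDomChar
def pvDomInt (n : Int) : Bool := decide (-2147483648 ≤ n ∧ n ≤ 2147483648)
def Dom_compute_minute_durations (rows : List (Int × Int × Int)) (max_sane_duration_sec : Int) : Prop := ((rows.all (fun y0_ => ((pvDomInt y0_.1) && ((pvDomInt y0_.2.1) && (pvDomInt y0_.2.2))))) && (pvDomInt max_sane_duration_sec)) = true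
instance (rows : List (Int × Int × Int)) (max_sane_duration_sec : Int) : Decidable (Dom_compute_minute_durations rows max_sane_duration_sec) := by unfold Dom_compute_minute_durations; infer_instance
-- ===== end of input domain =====

-- B replaces A's single branch-and-continue loop by a staged pipeline (diff table,
-- independent counting passes, event list, grouping pass); alternative decomposition, same cost.


-- ===== PORT A =====
-- minute_diff helper, shared verbatim by both Pythons
def pvMinuteDiff (prev curr : Int × Int × Int) : Int :=
  let d := (curr.2.1 * 60 + curr.2.2) - (prev.2.1 * 60 + prev.2.2)
  if d < 0 then d + 1440 else d

-- durations[(a,b)].append(v): update the key in place, or append it at the end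
def pvDurAppend (d : List (Int × Int × List Int)) (k : Int × Int) (v : Int) : List (Int × Int × List Int) :=
  match d with
  | [] => [(k.1, k.2, [v])]
  | (a, b, vs) :: t =>
      if a = k.1 ∧ b = k.2 then (a, b, vs ++ [v]) :: t else (a, b, vs) :: pvDurAppend t k v

-- loop body of A: state is (durations, skipped_gaps, skipped_outliers, skipped_post_gap_starts)
def pvAStep (rows : List (Int × Int × Int)) (msd : Int)
    (st : (List (Int × Int × List Int)) × Int × Int × Int) (i : Int) :
    (List (Int × Int × List Int)) × Int × Int × Int :=
  let prev := PySem.List.pyGetD rows (i - 1) (0, 0, 0)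
  let curr := PySem.List.pyGetD rows i (0, 0, 0)
  let nxt := PySem.List.pyGetD rows (i + 1) (0, 0, 0)
  if pvMinuteDiff prev curr ≠ 1 then (st.1, st.2.1, st.2.2.1, st.2.2.2 + 1)
  else if pvMinuteDiff curr nxt ≠ 1 then (st.1, st.2.1 + 1, st.2.2.1, st.2.2.2)
  else
    let duration_ms := nxt.1 - curr.1
    if duration_ms ≤ 0 ∨ msd * 1000 < duration_ms then (st.1, st.2.1, st.2.2.1 + 1, st.2.2.2)
    else (pvDurAppend st.1 (curr.2.1, curr.2.2) duration_ms, st.2.1, st.2.2.1, st.2.2.2)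

def compute_minute_durations (rows : List (Int × Int × Int)) (max_sane_duration_sec : Int) : (List (Int × Int × List Int)) × Int × Int × Int :=
  (PySem.List.pyRange 1 ((rows.length : Int) - 1) 1).foldl (pvAStep rows max_sane_duration_sec) ([], 0, 0, 0)

-- ===== PORT B =====
-- B (Source B) : diffs table, pairs of adjacent diffs, independent counting passes,
-- an event list, and a final grouping pass building the durations dict.
def compute_minute_durations_alt (rows : List (Int × Int × Int)) (max_sane_duration_sec : Int) : (List (Int × Int × List Int)) × Int × Int × Int :=
  let diffs := List.zipWith pvMinuteDiff rows rows.tail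
  let pairs := diffs.zip diffs.tail
  let skipped_post_gap_starts : Int := pairs.countP (fun p => p.1 ≠ 1)
  let skipped_gaps : Int := pairs.countP (fun p => p.1 = 1 ∧ p.2 ≠ 1)
  let limit := max_sane_duration_sec * 1000
  let events := (pairs.zip ((rows.drop 1).zip (rows.drop 2))).filterMap
      (fun x => if x.1.1 = 1 ∧ x.1.2 = 1 then some (x.2.1, x.2.2.1 - x.2.1.1) else none)
  let skipped_outliers : Int := events.countP (fun e => e.2 ≤ 0 ∨ limit < e.2)
  let durations := events.foldl
      (fun d e => if 0 < e.2 ∧ e.2 ≤ limit then pvDurAppend d (e.1.2.1, e.1.2.2) e.2 else d) []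
  (durations, skipped_gaps, skipped_outliers, skipped_post_gap_starts)

-- ===== PRECONDITION & SPEC =====
def Spec_compute_minute_durations (rows : List (Int × Int × Int)) (max_sane_duration_sec : Int) (out : (List (Int × Int × List Int)) × Int × Int × Int) : Prop := out = compute_minute_durations_alt rows max_sane_duration_sec
instance (rows : List (Int × Int × Int)) (max_sane_duration_sec : Int) (out : (List (Int × Int × List Int)) × Int × Int × Int) : Decidable (Spec_compute_minute_durations rows max_sane_duration_sec out) := by unfold Spec_compute_minute_durations; infer_instance

-- ===== CLAIM =====
def Claim_equal_compute_minute_durations : Prop := ∀ (rows : List (Int × Int × Int)) (max_sane_duration_sec : Int), Dom_compute_minute_durations rows max_sane_duration_sec → Spec_compute_minute_durations rows max_sane_duration_sec (compute_minute_durations rows max_sane_duration_sec)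

-- ===== LEMMAS AND PROOFS =====

-- the combined list B's passes run over: ((into,out),(curr,nxt)) per middle row
def pvL (rows : List (Int × Int × Int)) : List ((Int × Int) × (Int × Int × Int) × (Int × Int × Int)) :=
  let diffs := List.zipWith pvMinuteDiff rows rows.tail
  (diffs.zip diffs.tail).zip ((rows.drop 1).zip (rows.drop 2))

-- A's loop body rephrased on a triple entry of pvL
def pvTStep (msd : Int) (st : (List (Int × Int × List Int)) × Int × Int × Int)
    (x : (Int × Int) × (Int × Int × Int) × (Int × Int × Int)) :
    (List (Int × Int × List Int)) × Int × Int × Int :=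
  if x.1.1 ≠ 1 then (st.1, st.2.1, st.2.2.1, st.2.2.2 + 1)
  else if x.1.2 ≠ 1 then (st.1, st.2.1 + 1, st.2.2.1, st.2.2.2)
  else
    let duration_ms := x.2.2.1 - x.2.1.1
    if duration_ms ≤ 0 ∨ msd * 1000 < duration_ms then (st.1, st.2.1, st.2.2.1 + 1, st.2.2.2)
    else (pvDurAppend st.1 (x.2.1.2.1, x.2.1.2.2) duration_ms, st.2.1, st.2.2.1, st.2.2.2)

theorem pvL_cons (a b c : Int × Int × Int) (r : List (Int × Int × Int)) :
    pvL (a :: b :: c :: r)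
      = ((pvMinuteDiff a b, pvMinuteDiff b c), (b, c)) :: pvL (b :: c :: r) := rfl

theorem pvL_short (l : List (Int × Int × Int)) (h : l.length ≤ 2) : pvL l = [] := by
  match l with
  | [] => rfl
  | [_] => rfl
  | [_, _] => rfl
  | _ :: _ :: _ :: _ => simp at h

-- A's indexed foldl from index k equals the foldl of pvTStep over pvL of the suffix from k-1
theorem pvMain (msd : Int) (rows : List (Int × Int × Int)) :
    ∀ (rest : List (Int × Int × Int)) (k : Nat) (curr : Int × Int × Int)
      (st : (List (Int × Int × List Int)) × Int × Int × Int),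
      1 ≤ k → rows[k]? = some curr → rows.drop (k + 1) = rest →
      (PySem.List.pyRange (k : Int) ((rows.length : Int) - 1) 1).foldl (pvAStep rows msd) st
        = (pvL (rows.drop (k - 1))).foldl (pvTStep msd) st := by
  intro rest
  induction rest with
  | nil =>
      intro k curr st hk hget hdrop
      obtain ⟨hklt, hval⟩ := List.getElem?_eq_some_iff.mp hget
      have hlen : rows.length ≤ k + 1 := by
        have := List.drop_eq_nil_iff.mp hdrop; omega
      rw [PySem.List.pyRange_one_eq_nil (by omega)]
      rw [pvL_short _ (by simp [List.length_drop]; omega)]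
      rfl
  | cons nxt rest ih =>
      intro k curr st hk hget hdrop
      obtain ⟨hklt, hval⟩ := List.getElem?_eq_some_iff.mp hget
      have hnxt : rows[k + 1]? = some nxt := by
        have h1 : rows.drop (k + 1) = nxt :: rest := hdrop
        have : (rows.drop (k + 1))[0]? = some nxt := by rw [h1]; rfl
        simpa [List.getElem?_drop] using this
      obtain ⟨hk1lt, hnval⟩ := List.getElem?_eq_some_iff.mp hnxt
      have hdrop' : rows.drop (k + 1 + 1) = rest := by
        have : rows.drop (k + 1) = nxt :: rest := hdrop
        have h2 := congrArg (List.drop 1) this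
        simpa [List.drop_drop, Nat.add_comm] using h2
      -- decompose the suffix from k-1 as prev :: curr :: nxt :: _
      have hk1 : k - 1 < rows.length := by omega
      have hsplit : rows.drop (k - 1) = rows[k - 1] :: curr :: nxt :: rows.drop (k + 2) := by
        rw [List.drop_eq_getElem_cons hk1]
        congr 1
        have hkk : (k - 1) + 1 = k := by omega
        rw [hkk, List.drop_eq_getElem_cons hklt, hval]
        congr 1
        rw [List.drop_eq_getElem_cons hk1lt, hnval]
      rw [PySem.List.pyRange_one_cons (by omega), List.foldl_cons, hsplit, pvL_cons,
        List.foldl_cons]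
      have hprevv : PySem.List.pyGetD rows ((k : Int) - 1) (0, 0, 0) = rows[k - 1] := by
        have : ((k : Int) - 1) = ((k - 1 : Nat) : Int) := by omega
        rw [this, PySem.List.pyGetD_eq_getElem rows (0, 0, 0) (by omega) (by omega)]
        simp only [Int.toNat_natCast]
      have hcurr : PySem.List.pyGetD rows (k : Int) (0, 0, 0) = curr := by
        rw [PySem.List.pyGetD_eq_getElem rows (0, 0, 0) (by omega) (by omega)]
        simp only [Int.toNat_natCast]
        exact hval
      have hnxtv : PySem.List.pyGetD rows ((k : Int) + 1) (0, 0, 0) = nxt := by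
        have : ((k : Int) + 1) = ((k + 1 : Nat) : Int) := by push_cast; omega
        rw [this, PySem.List.pyGetD_eq_getElem rows (0, 0, 0) (by omega) (by push_cast; omega)]
        simp only [Int.toNat_natCast]
        exact hnval
      have hstep : pvAStep rows msd st (k : Int)
          = pvTStep msd st ((pvMinuteDiff rows[k - 1] curr, pvMinuteDiff curr nxt), (curr, nxt)) := by
        simp only [pvAStep, pvTStep, hprevv, hcurr, hnxtv]
      rw [hstep]
      have hrec := ih (k + 1) nxt (pvTStep msd st ((pvMinuteDiff rows[k - 1] curr, pvMinuteDiff curr nxt), (curr, nxt))) (by omega) hnxt hdrop'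
      have hcast : ((k + 1 : Nat) : Int) = (k : Int) + 1 := by push_cast; omega
      rw [hcast] at hrec
      have hkk : (k + 1) - 1 = k := by omega
      rw [hkk] at hrec
      have hdk : rows.drop k = curr :: nxt :: rows.drop (k + 2) := by
        rw [List.drop_eq_getElem_cons hklt, hval]
        congr 1
        rw [List.drop_eq_getElem_cons hk1lt, hnval]
      rw [hdk] at hrec
      exact hrec

-- the foldl of pvTStep splits into B's four independent passes
theorem pvSplit (msd : Int) :
    ∀ (l : List ((Int × Int) × (Int × Int × Int) × (Int × Int × Int)))
      (st : (List (Int × Int × List Int)) × Int × Int × Int),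
      l.foldl (pvTStep msd) st =
        (((l.filterMap (fun x => if x.1.1 = 1 ∧ x.1.2 = 1 then some (x.2.1, x.2.2.1 - x.2.1.1) else none)).foldl
            (fun d e => if 0 < e.2 ∧ e.2 ≤ msd * 1000 then pvDurAppend d (e.1.2.1, e.1.2.2) e.2 else d) st.1),
         st.2.1 + (l.countP (fun x => x.1.1 = 1 ∧ x.1.2 ≠ 1) : Int),
         st.2.2.1 + (((l.filterMap (fun x => if x.1.1 = 1 ∧ x.1.2 = 1 then some (x.2.1, x.2.2.1 - x.2.1.1) else none)).countP
            (fun e => e.2 ≤ 0 ∨ msd * 1000 < e.2)) : Int),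
         st.2.2.2 + (l.countP (fun x => x.1.1 ≠ 1) : Int)) := by
  intro l
  induction l with
  | nil => intro st; simp
  | cons x l ih =>
      intro st
      rw [List.foldl_cons, ih]
      by_cases h1 : x.1.1 = 1
      · by_cases h2 : x.1.2 = 1
        · have hf : (fun (x : (Int × Int) × (Int × Int × Int) × (Int × Int × Int)) =>
              if x.1.1 = 1 ∧ x.1.2 = 1 then some (x.2.1, x.2.2.1 - x.2.1.1) else none) x
                = some (x.2.1, x.2.2.1 - x.2.1.1) := if_pos ⟨h1, h2⟩
          simp only [List.filterMap_cons, hf]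
          by_cases h3 : x.2.2.1 - x.2.1.1 ≤ 0 ∨ msd * 1000 < x.2.2.1 - x.2.1.1
          · have hT : pvTStep msd st x = (st.1, st.2.1, st.2.2.1 + 1, st.2.2.2) := by
              simp only [pvTStep]
              rw [if_neg (by simp [h1]), if_neg (by simp [h2]), if_pos h3]
            rw [hT]
            simp only [List.countP_cons, List.foldl_cons]
            rw [if_neg (show ¬(0 < x.2.2.1 - x.2.1.1 ∧ x.2.2.1 - x.2.1.1 ≤ msd * 1000) by omega)]
            have c1 : (decide (x.1.1 = 1 ∧ ¬x.1.2 = 1)) = false := by simp [h2]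
            have c2 : (decide (¬x.1.1 = 1)) = false := by simp [h1]
            have c3 : decide (x.2.2.1 - x.2.1.1 ≤ 0 ∨ msd * 1000 < x.2.2.1 - x.2.1.1) = true := by
              simpa using h3
            simp only [c1, c2, c3, if_false, Bool.false_eq_true]
            refine Prod.ext rfl (Prod.ext (by push_cast; omega) (Prod.ext (by push_cast; omega) (by push_cast; omega)))
          · have hT : pvTStep msd st x
                = (pvDurAppend st.1 (x.2.1.2.1, x.2.1.2.2) (x.2.2.1 - x.2.1.1), st.2.1, st.2.2.1, st.2.2.2) := by
              simp only [pvTStep]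
              rw [if_neg (by simp [h1]), if_neg (by simp [h2]), if_neg h3]
            rw [hT]
            simp only [List.countP_cons, List.foldl_cons]
            rw [if_pos (show 0 < x.2.2.1 - x.2.1.1 ∧ x.2.2.1 - x.2.1.1 ≤ msd * 1000 by omega)]
            have c1 : (decide (x.1.1 = 1 ∧ ¬x.1.2 = 1)) = false := by simp [h2]
            have c2 : (decide (¬x.1.1 = 1)) = false := by simp [h1]
            have c3 : decide (x.2.2.1 - x.2.1.1 ≤ 0 ∨ msd * 1000 < x.2.2.1 - x.2.1.1) = false := by
              simpa using h3
            simp only [c1, c2, c3, if_false, Bool.false_eq_true]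
            refine Prod.ext rfl (Prod.ext (by push_cast; omega) (Prod.ext (by push_cast; omega) (by push_cast; omega)))
        · have hT : pvTStep msd st x = (st.1, st.2.1 + 1, st.2.2.1, st.2.2.2) := by
            simp only [pvTStep]
            rw [if_neg (by simp [h1]), if_pos (by simp [h2])]
          have hf : (fun (x : (Int × Int) × (Int × Int × Int) × (Int × Int × Int)) =>
              if x.1.1 = 1 ∧ x.1.2 = 1 then some (x.2.1, x.2.2.1 - x.2.1.1) else none) x
                = none := if_neg (by simp [h2])
          rw [hT]
          simp only [List.filterMap_cons, hf]
          simp only [List.countP_cons]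
          have c1 : (decide (x.1.1 = 1 ∧ ¬x.1.2 = 1)) = true := by simp [h1, h2]
          have c2 : (decide (¬x.1.1 = 1)) = false := by simp [h1]
          simp only [c1, c2, if_true, if_false, Bool.false_eq_true]
          refine Prod.ext rfl (Prod.ext (by push_cast; omega) (Prod.ext (by push_cast; omega) (by push_cast; omega)))
      · have hT : pvTStep msd st x = (st.1, st.2.1, st.2.2.1, st.2.2.2 + 1) := by
          simp only [pvTStep]
          rw [if_pos (by simp [h1])]
        have hf : (fun (x : (Int × Int) × (Int × Int × Int) × (Int × Int × Int)) =>
            if x.1.1 = 1 ∧ x.1.2 = 1 then some (x.2.1, x.2.2.1 - x.2.1.1) else none) x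
              = none := if_neg (by simp [h1])
        rw [hT]
        simp only [List.filterMap_cons, hf]
        simp only [List.countP_cons]
        have c1 : (decide (x.1.1 = 1 ∧ ¬x.1.2 = 1)) = false := by simp [h1]
        have c2 : (decide (¬x.1.1 = 1)) = true := by simp [h1]
        simp only [c1, c2, if_true, if_false, Bool.false_eq_true]
        refine Prod.ext rfl (Prod.ext (by push_cast; omega) (Prod.ext (by push_cast; omega) (by push_cast; omega)))

-- countP over a zip whose second component is long enough sees only the first components
-- (two specialised instances, for the two counter predicates)
theorem pvZipCountSG :
    ∀ (l : List (Int × Int)) (m : List ((Int × Int × Int) × (Int × Int × Int))),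
      l.length ≤ m.length →
      (l.zip m).countP (fun x => x.1.1 = 1 ∧ x.1.2 ≠ 1) = l.countP (fun p => p.1 = 1 ∧ p.2 ≠ 1) := by
  intro l
  induction l with
  | nil => intro m _; simp
  | cons a l ih =>
      intro m hm
      match m with
      | [] => simp at hm
      | b :: m =>
          simp only [List.zip_cons_cons, List.countP_cons, ih m (by simpa using hm)]

theorem pvZipCountPG :
    ∀ (l : List (Int × Int)) (m : List ((Int × Int × Int) × (Int × Int × Int))),
      l.length ≤ m.length →
      (l.zip m).countP (fun x => x.1.1 ≠ 1) = l.countP (fun p => p.1 ≠ 1) := by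
  intro l
  induction l with
  | nil => intro m _; simp
  | cons a l ih =>
      intro m hm
      match m with
      | [] => simp at hm
      | b :: m =>
          simp only [List.zip_cons_cons, List.countP_cons, ih m (by simpa using hm)]

-- B's staged passes compute exactly the foldl of pvTStep over pvL
theorem pvAltEq (rows : List (Int × Int × Int)) (msd : Int) :
    compute_minute_durations_alt rows msd = (pvL rows).foldl (pvTStep msd) ([], 0, 0, 0) := by
  rw [pvSplit]
  unfold compute_minute_durations_alt pvL
  simp only []
  have hlen : ((List.zipWith pvMinuteDiff rows rows.tail).zip (List.zipWith pvMinuteDiff rows rows.tail).tail).length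
      ≤ ((rows.drop 1).zip (rows.drop 2)).length := by
    simp; omega
  rw [pvZipCountSG _ _ hlen, pvZipCountPG _ _ hlen]
  simp only [zero_add]

-- ===== VERDICT =====
theorem compute_minute_durations_spec : Claim_equal_compute_minute_durations := by
  intro rows msd _
  unfold Spec_compute_minute_durations
  match rows with
  | [] => rfl
  | [r] => rfl
  | r0 :: r1 :: rest =>
      show (PySem.List.pyRange 1 (((r0 :: r1 :: rest).length : Int) - 1) 1).foldl _ _ = _
      have h := pvMain msd (r0 :: r1 :: rest) rest 1 r1 ([], 0, 0, 0) (by omega)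
        (by simp) (by simp)
      simp only [Nat.sub_self, List.drop_zero] at h
      rw [show ((1 : Nat) : Int) = 1 from rfl] at h
      rw [h, pvAltEq]
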